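-- pv_equiv track=rewrite | github.com/demiurgicgamer/nova-project-e | agent/curriculum_engine.py | _difficulty_search_order
-- ===== SOURCE A (Python) =====
-- def _difficulty_search_order(target: int) -> list[int]:
--     """
--     Return difficulty levels to query, in order of preference (closest to target first).
--     E.g. target=3 → [3, 2, 4, 1, 5]
--     """
--     order = [target]
--     for delta in range(1, 5):
--         lower = target - delta
--         upper = target + delta
--         if lower >= 1:
--             order.append(lower)
--         if upper <= 5:
--             order.append(upper)
--     return order
-- ===== SOURCE B (Python) =====
-- def _difficulty_search_order(target: int) -> list[int]:
--     # Collect-then-sort: gather target, its in-range lower neighbors and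
--     # in-range upper neighbors, then order by distance to target; the stable
--     # sort keeps each lower neighbor before the equally-distant upper one.
--     candidates = (
--         [target]
--         + [v for v in range(target - 4, target) if v >= 1]
--         + [v for v in range(target + 1, target + 5) if v <= 5]
--     )
--     return sorted(candidates, key=lambda v: abs(v - target))
-- ===== Notes on version B (the rewrite author's own statement) =====
-- stated objective: alternative
-- what changed: Replaces the symmetric delta-expansion loop with a collect-then-stable-sort strategy: build the in-range neighbor candidates with range comprehensions and sort them once by distance to target.
import Mathlib
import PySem

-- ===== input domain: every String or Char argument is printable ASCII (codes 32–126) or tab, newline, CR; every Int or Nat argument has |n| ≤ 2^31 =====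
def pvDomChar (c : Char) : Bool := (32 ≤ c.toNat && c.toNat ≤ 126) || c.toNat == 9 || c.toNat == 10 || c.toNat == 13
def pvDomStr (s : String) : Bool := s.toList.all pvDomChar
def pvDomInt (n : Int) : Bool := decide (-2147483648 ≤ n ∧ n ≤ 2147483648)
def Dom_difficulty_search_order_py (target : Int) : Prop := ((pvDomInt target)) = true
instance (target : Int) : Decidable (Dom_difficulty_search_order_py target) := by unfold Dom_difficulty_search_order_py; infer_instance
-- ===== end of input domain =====

-- B replaces A's delta-expansion loop by collecting the in-range neighbor
-- candidates and stable-sorting them once by distance to target (alternative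
-- decomposition, same cost).

-- ===== PORT A =====
def difficulty_search_order_py (target : Int) : List Int :=
  (PySem.List.pyRange 1 5 1).foldl (fun order delta =>
    let lower := target - delta
    let upper := target + delta
    let order := if lower ≥ 1 then order ++ [lower] else order
    if upper ≤ 5 then order ++ [upper] else order) [target]

-- ===== PORT B =====
def difficulty_search_order_py_alt (target : Int) : List Int :=
  let candidates :=
    [target]
      ++ (PySem.List.pyRange (target - 4) target 1).filter (fun v => v ≥ 1)
      ++ (PySem.List.pyRange (target + 1) (target + 5) 1).filter (fun v => v ≤ 5)
  PySem.List.sorted candidates (fun v => |v - target|)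

-- ===== PRECONDITION & SPEC =====
def Spec_difficulty_search_order_py (target : Int) (out : List Int) : Prop := out = difficulty_search_order_py_alt target
instance (target : Int) (out : List Int) : Decidable (Spec_difficulty_search_order_py target out) := by unfold Spec_difficulty_search_order_py; infer_instance

-- ===== CLAIM (what is proved, stated in full; the proofs are below) =====
def Claim_equal_difficulty_search_order_py : Prop := ∀ (target : Int), Dom_difficulty_search_order_py target → Spec_difficulty_search_order_py target (difficulty_search_order_py target)

-- ===== LEMMAS AND PROOFS =====

theorem pv_Alow (t : Int) (h : t ≤ 1) :
    difficulty_search_order_py t = [t, t+1, t+2, t+3, t+4] := by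
  have hr : PySem.List.pyRange 1 5 1 = [1, 2, 3, 4] := by decide
  have l1 : (t - 1 ≥ 1) = False := eq_false (by omega)
  have l2 : (t - 2 ≥ 1) = False := eq_false (by omega)
  have l3 : (t - 3 ≥ 1) = False := eq_false (by omega)
  have l4 : (t - 4 ≥ 1) = False := eq_false (by omega)
  have u1 : (t + 1 ≤ 5) = True := eq_true (by omega)
  have u2 : (t + 2 ≤ 5) = True := eq_true (by omega)
  have u3 : (t + 3 ≤ 5) = True := eq_true (by omega)
  have u4 : (t + 4 ≤ 5) = True := eq_true (by omega)
  unfold difficulty_search_order_py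
  rw [hr]
  simp [List.foldl, l1, l2, l3, l4, u1, u2, u3, u4]

theorem pv_Ahigh (t : Int) (h : 5 ≤ t) :
    difficulty_search_order_py t = [t, t-1, t-2, t-3, t-4] := by
  have hr : PySem.List.pyRange 1 5 1 = [1, 2, 3, 4] := by decide
  have l1 : (t - 1 ≥ 1) = True := eq_true (by omega)
  have l2 : (t - 2 ≥ 1) = True := eq_true (by omega)
  have l3 : (t - 3 ≥ 1) = True := eq_true (by omega)
  have l4 : (t - 4 ≥ 1) = True := eq_true (by omega)
  have u1 : (t + 1 ≤ 5) = False := eq_false (by omega)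
  have u2 : (t + 2 ≤ 5) = False := eq_false (by omega)
  have u3 : (t + 3 ≤ 5) = False := eq_false (by omega)
  have u4 : (t + 4 ≤ 5) = False := eq_false (by omega)
  unfold difficulty_search_order_py
  rw [hr]
  simp [List.foldl, l1, l2, l3, l4, u1, u2, u3, u4]

theorem pv_lowRange (t : Int) :
    PySem.List.pyRange (t - 4) t 1 = [t-4, t-3, t-2, t-1] := by
  rw [PySem.List.pyRange_one]
  have h4 : (t - (t - 4)).toNat = 4 := by omega
  rw [h4]
  simp [List.range_succ]
  constructor <;> [skip; constructor] <;> ring_nf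

theorem pv_upRange (t : Int) :
    PySem.List.pyRange (t + 1) (t + 5) 1 = [t+1, t+2, t+3, t+4] := by
  rw [PySem.List.pyRange_one]
  have h4 : (t + 5 - (t + 1)).toNat = 4 := by omega
  rw [h4]
  simp [List.range_succ]
  constructor <;> [skip; constructor] <;> ring_nf

theorem pv_filtLow_nil (t : Int) (h : t ≤ 1) :
    (PySem.List.pyRange (t - 4) t 1).filter (fun v => v ≥ 1) = [] := by
  apply List.filter_eq_nil_iff.mpr
  intro v hv
  rw [PySem.List.mem_pyRange_one] at hv
  simp only [ge_iff_le, decide_eq_true_eq]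
  omega

theorem pv_filtLow_all (t : Int) (h : 5 ≤ t) :
    (PySem.List.pyRange (t - 4) t 1).filter (fun v => v ≥ 1) = [t-4, t-3, t-2, t-1] := by
  rw [List.filter_eq_self.mpr, pv_lowRange]
  intro v hv
  rw [PySem.List.mem_pyRange_one] at hv
  simp only [ge_iff_le, decide_eq_true_eq]
  omega

theorem pv_filtUp_all (t : Int) (h : t ≤ 1) :
    (PySem.List.pyRange (t + 1) (t + 5) 1).filter (fun v => v ≤ 5) = [t+1, t+2, t+3, t+4] := by
  rw [List.filter_eq_self.mpr, pv_upRange]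
  intro v hv
  rw [PySem.List.mem_pyRange_one] at hv
  simp only [decide_eq_true_eq]
  omega

theorem pv_filtUp_nil (t : Int) (h : 5 ≤ t) :
    (PySem.List.pyRange (t + 1) (t + 5) 1).filter (fun v => v ≤ 5) = [] := by
  apply List.filter_eq_nil_iff.mpr
  intro v hv
  rw [PySem.List.mem_pyRange_one] at hv
  simp only [decide_eq_true_eq]
  omega

theorem pv_Blow (t : Int) (h : t ≤ 1) :
    difficulty_search_order_py_alt t = [t, t+1, t+2, t+3, t+4] := by
  unfold difficulty_search_order_py_alt
  rw [pv_filtLow_nil t h, pv_filtUp_all t h]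
  have hpair : ([t, t+1, t+2, t+3, t+4] : List Int).Pairwise
      (fun a b => |a - t| < |b - t|) := by
    have e1 : t + 1 - t = 1 := by ring
    have e2 : t + 2 - t = 2 := by ring
    have e3 : t + 3 - t = 3 := by ring
    have e4 : t + 4 - t = 4 := by ring
    simp [List.pairwise_cons, e1, e2, e3, e4]
  have hperm : ([t, t+1, t+2, t+3, t+4] : List Int).Perm
      ([t] ++ [] ++ [t+1, t+2, t+3, t+4]) := by simp
  exact PySem.List.sorted_eq_of_perm_of_pairwise_lt _ _ _ hperm hpair

theorem pv_Bhigh (t : Int) (h : 5 ≤ t) :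
    difficulty_search_order_py_alt t = [t, t-1, t-2, t-3, t-4] := by
  unfold difficulty_search_order_py_alt
  rw [pv_filtLow_all t h, pv_filtUp_nil t h]
  have hpair : ([t, t-1, t-2, t-3, t-4] : List Int).Pairwise
      (fun a b => |a - t| < |b - t|) := by
    have e1 : t - 1 - t = -1 := by ring
    have e2 : t - 2 - t = -2 := by ring
    have e3 : t - 3 - t = -3 := by ring
    have e4 : t - 4 - t = -4 := by ring
    simp [List.pairwise_cons, e1, e2, e3, e4]
  have hperm : ([t, t-1, t-2, t-3, t-4] : List Int).Perm
      ([t] ++ [t-4, t-3, t-2, t-1] ++ []) := by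
    have hrev := List.reverse_perm [t-4, t-3, t-2, t-1]
    simp only [List.reverse_cons, List.reverse_nil, List.nil_append,
      List.cons_append, List.append_nil] at hrev ⊢
    exact List.Perm.cons t hrev
  exact PySem.List.sorted_eq_of_perm_of_pairwise_lt _ _ _ hperm hpair

-- ===== VERDICT (by name: the statement is the Claim_ definition above) =====
theorem difficulty_search_order_py_spec : Claim_equal_difficulty_search_order_py := by
  intro t _
  unfold Spec_difficulty_search_order_py
  have h : t ≤ 1 ∨ t = 2 ∨ t = 3 ∨ t = 4 ∨ 5 ≤ t := by omega
  rcases h with h | rfl | rfl | rfl | h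
  · rw [pv_Alow t h, pv_Blow t h]
  · decide
  · decide
  · decide
  · rw [pv_Ahigh t h, pv_Bhigh t h]
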